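-- pv_equiv track=rewrite | github.com/Rhys-sg/Topographic-Speciation | calc_allele_counts.py | calc_allele_counts
-- ===== SOURCE A (Python) =====
-- def calc_allele_counts(gens_genotype_data):
--     """
--     Calculate allele counts for multiple loci with given the male/female genotype counts.
--
--     """
--     gens_allele_counts = []
--     for genotype_data in gens_genotype_data:
--         allele_counts = {}
--
--         for genotype, data in genotype_data.items():
--             for i, locus in enumerate(genotype):
--                 for allele in locus:
--                     if allele not in allele_counts:
--                         allele_counts[allele] = 0
--                     allele_counts[allele] += data['Nm'] + data['Nf']
--
--         gens_allele_counts.append(allele_counts)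
--
--     return gens_allele_counts
-- ===== SOURCE B (Python) =====
-- def calc_allele_counts(gens_genotype_data):
--     """
--     Calculate allele counts for multiple loci given the male/female genotype counts.
--     Staged: flatten each generation to a weighted allele stream, list the distinct
--     alleles in first-occurrence order, then compute each total by summing the stream.
--     """
--     gens_allele_counts = []
--     for genotype_data in gens_genotype_data:
--         stream = [(allele, data['Nm'] + data['Nf'])
--                   for genotype, data in genotype_data.items()
--                   for locus in genotype
--                   for allele in locus]
--         order = []
--         for allele, _ in stream:
--             if allele not in order:
--                 order.append(allele)
--         gens_allele_counts.append(
--             {a: sum(w for x, w in stream if x == a) for a in order})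
--     return gens_allele_counts
-- ===== Notes on version B (the rewrite author's own statement) =====
-- stated objective: alternative
-- what changed: B keeps no running count dict at all: per generation it first flattens everything into one weighted (allele, weight) occurrence stream, then lists the distinct alleles in first-occurrence order, and finally builds the result by summing the stream once per distinct allele, whereas A accumulates into a dict per occurrence while traversing the nested structure.
import Mathlib
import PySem

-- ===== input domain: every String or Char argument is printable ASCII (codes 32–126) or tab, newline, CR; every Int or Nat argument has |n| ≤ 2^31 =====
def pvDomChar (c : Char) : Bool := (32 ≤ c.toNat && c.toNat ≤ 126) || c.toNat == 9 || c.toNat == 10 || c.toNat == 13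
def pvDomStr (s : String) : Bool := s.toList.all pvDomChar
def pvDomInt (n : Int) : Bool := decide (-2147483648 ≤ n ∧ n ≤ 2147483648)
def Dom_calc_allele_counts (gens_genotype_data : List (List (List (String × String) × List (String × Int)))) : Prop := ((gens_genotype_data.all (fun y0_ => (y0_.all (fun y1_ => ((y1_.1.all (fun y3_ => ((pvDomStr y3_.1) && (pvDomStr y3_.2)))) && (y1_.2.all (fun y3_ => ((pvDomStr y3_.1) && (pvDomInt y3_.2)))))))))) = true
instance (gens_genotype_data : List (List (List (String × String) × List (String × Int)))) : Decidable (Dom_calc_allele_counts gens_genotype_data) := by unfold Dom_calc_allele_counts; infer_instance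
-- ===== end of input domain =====

-- ===== PORT A =====
-- B drops A's running count dict: it flattens each generation into a weighted occurrence
-- stream, lists the distinct alleles in first-occurrence order, then sums the stream once
-- per distinct allele (alternative staged decomposition; not claimed faster).
-- Python dicts are association lists (insertion order, first-match lookup); data['Nm'] is
-- ported as getD _ 0 — the KeyError case is excluded by Pre_calc_allele_counts.
def calc_allele_counts (gens_genotype_data : List (List (List (String × String) × List (String × Int)))) : List (List (String × Int)) :=
  List.foldl
    (fun gens_allele_counts genotype_data =>
      let allele_counts : PySem.Dict String Int :=
        genotype_data.foldl
          (fun allele_counts p =>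
            (PySem.List.enumerate p.1 0).foldl
              (fun allele_counts il =>
                [il.2.1, il.2.2].foldl
                  (fun allele_counts allele =>
                    let ac2 := if allele_counts.contains allele then allele_counts
                               else allele_counts.insert allele 0
                    ac2.insert allele (ac2.getD allele 0 +
                      ((PySem.Dict.mk p.2).getD "Nm" 0 + (PySem.Dict.mk p.2).getD "Nf" 0)))
                  allele_counts)
              allele_counts)
          PySem.Dict.empty
      gens_allele_counts ++ [allele_counts.items])
    [] gens_genotype_data

-- ===== PORT B =====
def calc_allele_counts_alt (gens_genotype_data : List (List (List (String × String) × List (String × Int)))) : List (List (String × Int)) :=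
  List.foldl
    (fun gens_allele_counts genotype_data =>
      let stream : List (String × Int) :=
        genotype_data.flatMap (fun p =>
          p.1.flatMap (fun locus =>
            [locus.1, locus.2].map (fun allele =>
              (allele, (PySem.Dict.mk p.2).getD "Nm" 0 + (PySem.Dict.mk p.2).getD "Nf" 0))))
      let order : List String :=
        stream.foldl (fun order q => if order.contains q.1 then order else order ++ [q.1]) []
      gens_allele_counts ++
        [order.map (fun a => (a, ((stream.filter (fun q => q.1 == a)).map Prod.snd).sum))])
    [] gens_genotype_data

-- ===== PRECONDITION & SPEC =====
-- Pre_ excludes exactly the inputs where Python A raises KeyError: some genotype with at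
-- least one locus whose data dict lacks the key 'Nm' or 'Nf'.
def Pre_calc_allele_counts (gens_genotype_data : List (List (List (String × String) × List (String × Int)))) : Prop :=
  (gens_genotype_data.all (fun genotype_data =>
    genotype_data.all (fun p =>
      p.1.isEmpty ||
        ((PySem.Dict.mk p.2).contains "Nm" && (PySem.Dict.mk p.2).contains "Nf")))) = true
instance (gens_genotype_data : List (List (List (String × String) × List (String × Int)))) : Decidable (Pre_calc_allele_counts gens_genotype_data) := by unfold Pre_calc_allele_counts; infer_instance

def pvWitness_calc_allele_counts : (List (List (List (String × String) × List (String × Int)))) :=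
  [[([("A", "a"), ("a", "a")], [("Nm", 2), ("Nf", 3)])]]

def Spec_calc_allele_counts (gens_genotype_data : List (List (List (String × String) × List (String × Int)))) (out : List (List (String × Int))) : Prop := out = calc_allele_counts_alt gens_genotype_data
instance (gens_genotype_data : List (List (List (String × String) × List (String × Int)))) (out : List (List (String × Int))) : Decidable (Spec_calc_allele_counts gens_genotype_data out) := by unfold Spec_calc_allele_counts; infer_instance

-- ===== CLAIM (what is proved, stated in full; the proofs are below) =====
def Claim_equal_calc_allele_counts : Prop := ∀ (gens_genotype_data : List (List (List (String × String) × List (String × Int)))), Dom_calc_allele_counts gens_genotype_data → Pre_calc_allele_counts gens_genotype_data → Spec_calc_allele_counts gens_genotype_data (calc_allele_counts gens_genotype_data)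

-- ===== LEMMAS AND PROOFS =====

-- sum of the weights the stream carries for one allele (B's per-allele sum)
def pvSumW (L : List (String × Int)) (a : String) : Int :=
  ((L.filter (fun q => q.1 == a)).map Prod.snd).sum

lemma pv_sumW_cons (a b : String) (w : Int) (L : List (String × Int)) :
    pvSumW ((a, w) :: L) b = if b = a then w + pvSumW L b else pvSumW L b := by
  by_cases h : b = a
  · subst h; simp [pvSumW]
  · simp [pvSumW, h, Ne.symm h]

-- A's guarded "insert 0 then +=" step is one insert-add.
lemma pv_stepA_eq (d : PySem.Dict String Int) (a : String) (w : Int) :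
    (let d2 := if d.contains a then d else d.insert a 0
     d2.insert a (d2.getD a 0 + w)) = d.insert a (d.getD a 0 + w) := by
  by_cases h : d.contains a = true
  · simp [h]
  · simp only [Bool.not_eq_true] at h
    simp [h, PySem.Dict.getD_insert_self, PySem.Dict.insert_insert_self,
      PySem.Dict.getD_of_not_contains d 0 h]

-- a fold over enumerate that ignores the index is a fold over the list
lemma pv_foldl_enumerate {b : Type} (g : List (String × String)) :
    ∀ (s : Int) (d : b) (F : b → (String × String) → b),
      (PySem.List.enumerate g s).foldl (fun d il => F d il.2) d = g.foldl F d := by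
  induction g with
  | nil => intro s d F; simp [PySem.List.enumerate]
  | cons x t ih => intro s d F; simp [PySem.List.enumerate, ih]

-- the nested loci/allele loop is a fold over the flattened occurrence list
lemma pv_foldl_pairs {b : Type} (g : List (String × String)) :
    ∀ (d : b) (f : b → String → b),
      g.foldl (fun d l => [l.1, l.2].foldl f d) d = (g.flatMap (fun l => [l.1, l.2])).foldl f d := by
  induction g with
  | nil => intro d f; simp
  | cons x t ih =>
    intro d f
    simp only [List.foldl_cons, List.flatMap_cons, List.foldl_append]
    exact ih _ f

-- A's generation loop, with the step normalised, is one insert-add fold over the stream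
lemma pv_foldl_stream (gd : List (List (String × String) × List (String × Int))) :
    ∀ (d : PySem.Dict String Int),
      gd.foldl
        (fun d p =>
          (p.1.flatMap (fun l => [l.1, l.2])).foldl
            (fun (x : PySem.Dict String Int) (a : String) =>
              x.insert a (x.getD a 0 +
                ((PySem.Dict.mk p.2).getD "Nm" 0 + (PySem.Dict.mk p.2).getD "Nf" 0)))
            d)
        d
      = (gd.flatMap (fun p =>
          (p.1.flatMap (fun l => [l.1, l.2])).map (fun allele =>
            (allele, (PySem.Dict.mk p.2).getD "Nm" 0 + (PySem.Dict.mk p.2).getD "Nf" 0)))).foldl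
          (fun (x : PySem.Dict String Int) (q : String × Int) =>
            x.insert q.1 (x.getD q.1 0 + q.2)) d := by
  induction gd with
  | nil => intro d; rfl
  | cons p t ih =>
    intro d
    simp only [List.foldl_cons, List.flatMap_cons, List.foldl_append, List.foldl_map]
    exact ih _

-- order-preserving "first occurrence" set: ofList of a cons
lemma pv_ofList_cons (a : String) (L : List String) :
    PySem.Set.ofList (a :: L) = a :: (PySem.Set.ofList L).filter (fun y => !(y == a)) := by
  have h : a :: L = [a] ++ L := rfl
  rw [h, PySem.Set.ofList_append, PySem.Set.update_eq_append_filter]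
  simp [PySem.Set.contains, PySem.Set.ofList]
  exact List.filter_congr (fun y _ => by cases hy : y == a <;> simp_all)

-- items of the insert-add fold over a weighted stream: old values get their stream sum
-- added; new keys are appended in first-occurrence order with their stream sum
lemma pv_items_foldl_w :
    ∀ (L : List (String × Int)) (d : PySem.Dict String Int), d.keys.Nodup →
      (L.foldl (fun (x : PySem.Dict String Int) q => x.insert q.1 (x.getD q.1 0 + q.2)) d).items
        = d.items.map (fun p => (p.1, p.2 + pvSumW L p.1))
          ++ ((PySem.Set.ofList (L.map Prod.fst)).filter (fun a => !d.contains a)).map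
              (fun a => (a, pvSumW L a)) := by
  intro L
  induction L with
  | nil => intro d _; simp [pvSumW, PySem.Set.ofList]
  | cons q L' ih =>
    intro d hd
    obtain ⟨a, w⟩ := q
    rw [List.foldl_cons, ih _ (PySem.Dict.nodup_keys_insert _ _ _ hd), List.map_cons,
      pv_ofList_cons]
    have hcnt : ∀ b : String, b ≠ a → pvSumW ((a, w) :: L') b = pvSumW L' b := by
      intro b hba; rw [pv_sumW_cons]; simp [hba]
    have hcnta : pvSumW ((a, w) :: L') a = w + pvSumW L' a := by
      rw [pv_sumW_cons]; simp
    by_cases h : d.contains a = true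
    · rw [PySem.Dict.items_insert_of_contains d _ h, List.map_map]
      have hmap : d.items.map ((fun p => (p.1, p.2 + pvSumW L' p.1)) ∘
            (fun p => if (p.1 == a) = true then (a, d.getD a 0 + w) else p))
          = d.items.map (fun p => (p.1, p.2 + pvSumW ((a, w) :: L') p.1)) := by
        refine List.map_congr_left (fun p hp => ?_)
        by_cases hpa : p.1 = a
        · have hp2 : d.getD a 0 = p.2 := by
            have hm : (a, p.2) ∈ d.items := by
              have : p = (a, p.2) := by rw [← hpa]
              exact this ▸ hp
            exact PySem.Dict.getD_of_mem_items d hm hd 0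
          simp [Function.comp, hpa, hp2, hcnta, Prod.ext_iff]
          ring
        · simp [hpa, hcnt p.1 hpa]
      rw [hmap]
      have hfleft : (PySem.Set.ofList (L'.map Prod.fst)).filter
            (fun b => !(d.insert a (d.getD a 0 + w)).contains b)
          = ((PySem.Set.ofList (L'.map Prod.fst)).filter (fun y => !(y == a))).filter
              (fun b => !d.contains b) := by
        rw [List.filter_filter]
        refine List.filter_congr (fun b _ => ?_)
        by_cases hba : b = a <;> simp [PySem.Dict.contains_insert, hba, Bool.and_comm]
      rw [hfleft]
      have hmr : (((PySem.Set.ofList (L'.map Prod.fst)).filter (fun y => !(y == a))).filter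
              (fun b => !d.contains b)).map (fun b => (b, pvSumW L' b))
          = (((PySem.Set.ofList (L'.map Prod.fst)).filter (fun y => !(y == a))).filter
              (fun b => !d.contains b)).map (fun b => (b, pvSumW ((a, w) :: L') b)) := by
        refine List.map_congr_left (fun b hb => ?_)
        have hba : ¬(b = a) := by
          have := (List.mem_filter.mp (List.mem_filter.mp hb).1).2
          simpa using this
        simp [hcnt b hba]
      rw [hmr]
      simp [h]
    · simp only [Bool.not_eq_true] at h
      rw [PySem.Dict.items_insert_of_not_contains d _ h,
        PySem.Dict.getD_of_not_contains d 0 h, List.map_append]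
      have hnm : ∀ p ∈ d.items, p.1 ≠ a := by
        intro p hp he
        have : d.contains a = true :=
          (PySem.Dict.contains_iff_mem_keys d a).mpr (he ▸ PySem.Dict.mem_keys_of_mem_items d hp)
        simp [this] at h
      have hmap : d.items.map (fun p => (p.1, p.2 + pvSumW L' p.1))
          = d.items.map (fun p => (p.1, p.2 + pvSumW ((a, w) :: L') p.1)) := by
        refine List.map_congr_left (fun p hp => by simp [hcnt p.1 (hnm p hp)])
      rw [hmap]
      have hfleft : (PySem.Set.ofList (L'.map Prod.fst)).filter
            (fun b => !(d.insert a (0 + w)).contains b)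
          = ((PySem.Set.ofList (L'.map Prod.fst)).filter (fun y => !(y == a))).filter
              (fun b => !d.contains b) := by
        rw [List.filter_filter]
        refine List.filter_congr (fun b _ => ?_)
        by_cases hba : b = a <;> simp [PySem.Dict.contains_insert, hba, Bool.and_comm]
      rw [hfleft]
      have hmr : (((PySem.Set.ofList (L'.map Prod.fst)).filter (fun y => !(y == a))).filter
              (fun b => !d.contains b)).map (fun b => (b, pvSumW L' b))
          = (((PySem.Set.ofList (L'.map Prod.fst)).filter (fun y => !(y == a))).filter
              (fun b => !d.contains b)).map (fun b => (b, pvSumW ((a, w) :: L') b)) := by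
        refine List.map_congr_left (fun b hb => ?_)
        have hba : ¬(b = a) := by
          have := (List.mem_filter.mp (List.mem_filter.mp hb).1).2
          simpa using this
        simp [hcnt b hba]
      rw [hmr]
      have hval : (0 : Int) + w + pvSumW L' a = pvSumW ((a, w) :: L') a := by
        rw [hcnta]; ring
      simp [h, hcnta, List.append_assoc]

-- B's first-occurrence loop over the stream is set(<keys of the stream>)
lemma pv_order_eq_ofList (L : List (String × Int)) :
    L.foldl
        (fun (order : List String) q =>
          if order.contains q.1 then order else order ++ [q.1]) []
      = PySem.Set.ofList (L.map Prod.fst) := by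
  rw [PySem.Set.ofList_eq_foldl, List.foldl_map]
  rfl

-- the per-generation results agree
lemma pv_gen_eq (genotype_data : List (List (String × String) × List (String × Int))) :
    (genotype_data.foldl
      (fun allele_counts p =>
        (PySem.List.enumerate p.1 0).foldl
          (fun allele_counts il =>
            [il.2.1, il.2.2].foldl
              (fun allele_counts allele =>
                let ac2 := if allele_counts.contains allele then allele_counts
                           else allele_counts.insert allele 0
                ac2.insert allele (ac2.getD allele 0 +
                  ((PySem.Dict.mk p.2).getD "Nm" 0 + (PySem.Dict.mk p.2).getD "Nf" 0)))
              allele_counts)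
          allele_counts)
      (PySem.Dict.empty : PySem.Dict String Int)).items
    = ((genotype_data.flatMap (fun p =>
          p.1.flatMap (fun locus =>
            [locus.1, locus.2].map (fun allele =>
              (allele, (PySem.Dict.mk p.2).getD "Nm" 0 + (PySem.Dict.mk p.2).getD "Nf" 0))))).foldl
          (fun order q => if order.contains q.1 then order else order ++ [q.1]) []).map
        (fun a => (a,
          (((genotype_data.flatMap (fun p =>
              p.1.flatMap (fun locus =>
                [locus.1, locus.2].map (fun allele =>
                  (allele, (PySem.Dict.mk p.2).getD "Nm" 0 + (PySem.Dict.mk p.2).getD "Nf" 0))))).filter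
            (fun q => q.1 == a)).map Prod.snd).sum)) := by
  have hstep : ∀ (p : List (String × String) × List (String × Int)),
      (fun (allele_counts : PySem.Dict String Int) (allele : String) =>
          let ac2 := if allele_counts.contains allele then allele_counts
                     else allele_counts.insert allele 0
          ac2.insert allele (ac2.getD allele 0 +
            ((PySem.Dict.mk p.2).getD "Nm" 0 + (PySem.Dict.mk p.2).getD "Nf" 0)))
        = (fun (allele_counts : PySem.Dict String Int) (allele : String) =>
            allele_counts.insert allele (allele_counts.getD allele 0 +
              ((PySem.Dict.mk p.2).getD "Nm" 0 + (PySem.Dict.mk p.2).getD "Nf" 0))) :=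
    fun p => funext (fun ac => funext (fun allele => pv_stepA_eq ac allele _))
  have hfun : (fun (allele_counts : PySem.Dict String Int)
        (p : List (String × String) × List (String × Int)) =>
        (PySem.List.enumerate p.1 0).foldl
          (fun allele_counts il =>
            [il.2.1, il.2.2].foldl
              (fun allele_counts allele =>
                let ac2 := if allele_counts.contains allele then allele_counts
                           else allele_counts.insert allele 0
                ac2.insert allele (ac2.getD allele 0 +
                  ((PySem.Dict.mk p.2).getD "Nm" 0 + (PySem.Dict.mk p.2).getD "Nf" 0)))
              allele_counts)
          allele_counts)
      = (fun (d : PySem.Dict String Int) p =>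
          (p.1.flatMap (fun l => [l.1, l.2])).foldl
            (fun (x : PySem.Dict String Int) (a : String) =>
              x.insert a (x.getD a 0 +
                ((PySem.Dict.mk p.2).getD "Nm" 0 + (PySem.Dict.mk p.2).getD "Nf" 0)))
            d) := by
    funext d p
    rw [hstep p,
      pv_foldl_enumerate p.1 0 d
        (fun ac l => [l.1, l.2].foldl
          (fun (x : PySem.Dict String Int) (a : String) => x.insert a (x.getD a 0 +
            ((PySem.Dict.mk p.2).getD "Nm" 0 + (PySem.Dict.mk p.2).getD "Nf" 0))) ac),
      pv_foldl_pairs]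
  rw [hfun, pv_foldl_stream,
    pv_items_foldl_w _ PySem.Dict.empty PySem.Dict.nodup_keys_empty]
  rw [pv_order_eq_ofList]
  simp only [List.map_flatMap]
  have hf : ∀ S : List String,
      S.filter (fun a => !(PySem.Dict.empty : PySem.Dict String Int).contains a) = S :=
    fun S => List.filter_eq_self.mpr (fun a _ => rfl)
  simp only [hf]
  show ([] : List (String × Int)).map _ ++ _ = _
  simp only [List.map_nil, List.nil_append]
  rfl

-- ===== VERDICT (by name: the statement is the Claim_ definition above) =====
theorem calc_allele_counts_spec : Claim_equal_calc_allele_counts := by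
  intro gens _ _
  unfold Spec_calc_allele_counts calc_allele_counts calc_allele_counts_alt
  simp only [PySem.List.foldl_append_singleton_eq_map, List.nil_append]
  exact List.map_congr_left (fun gd _ => by simpa using pv_gen_eq gd)
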